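-- pv_equiv track=rewrite | github.com/mhk51/EECE455_Project | monoalphabetic_cipher.py | encrypt_Monoalphabetic
-- ===== SOURCE A (Python) =====
-- valid_letters = "abcdefghijklmnopqrstuvwxyz"
--
-- def encrypt_Monoalphabetic(plaintext,inputkey):
--     key = ""
--     nonalphaChars = []
--     new_string = ""
--     for i in  range(len(plaintext)):
--         char = plaintext[i]
--         if char in valid_letters:
--             new_string += char
--         else:
--             nonalphaChars += [(i,char)]
--
--     for char in inputkey:
--         if char in valid_letters:
--             if char not in key:
--                 key += char
--
--     for char in valid_letters:
--         if char not in key: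
--             key += char
--     index_values = [valid_letters.index(char) for char in new_string]
--     string =  "".join(key[indexKey] for indexKey in index_values)
--     for i in range(len(nonalphaChars)):
--         index = nonalphaChars[i][0]
--         char = nonalphaChars[i][1]
--         string  = string[:index] + char + string[index:]
--     return string
-- ===== SOURCE B (Python) =====
-- valid_letters = "abcdefghijklmnopqrstuvwxyz"
--
-- def encrypt_Monoalphabetic(plaintext, inputkey):
--     # Build the substitution key: deduplicated lowercase letters of inputkey,
--     # then the remaining alphabet letters in order.
--     key = ""
--     for char in inputkey:
--         if char in valid_letters and char not in key:
--             key += char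
--     for char in valid_letters:
--         if char not in key:
--             key += char
--     # Single pass: substitute lowercase letters, leave everything else in place.
--     return "".join(key[valid_letters.index(ch)] if ch in valid_letters else ch
--                    for ch in plaintext)
-- ===== Notes on version B (the rewrite author's own statement) =====
-- stated objective: simpler
-- what changed: B drops A's alpha/non-alpha partition, index_values table and quadratic slice-reinsertion loop, substituting each character (or passing it through) in one unified pass over the plaintext.
import Mathlib
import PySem

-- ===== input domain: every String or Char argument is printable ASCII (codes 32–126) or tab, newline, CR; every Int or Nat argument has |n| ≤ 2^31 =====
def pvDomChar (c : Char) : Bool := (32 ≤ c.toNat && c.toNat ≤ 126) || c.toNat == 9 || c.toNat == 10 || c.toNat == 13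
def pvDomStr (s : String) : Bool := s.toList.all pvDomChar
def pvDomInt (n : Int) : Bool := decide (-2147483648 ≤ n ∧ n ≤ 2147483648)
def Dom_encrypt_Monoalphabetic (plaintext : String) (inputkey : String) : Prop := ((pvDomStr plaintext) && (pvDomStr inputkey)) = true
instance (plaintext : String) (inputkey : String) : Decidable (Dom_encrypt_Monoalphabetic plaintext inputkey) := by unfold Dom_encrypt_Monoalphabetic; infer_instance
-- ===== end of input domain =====

-- B replaces A's partition / index-table / slice-reinsertion pipeline by one substitution pass (objective: simpler).

-- valid_letters (module constant)
def pvValid : List Char := "abcdefghijklmnopqrstuvwxyz".toList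

-- shared key construction: both A and B build the key by exactly these two loops
def pvBuildKey (inputkey : String) : List Char :=
  let key1 := inputkey.toList.foldl
    (fun key c => if c ∈ pvValid then (if c ∉ key then key ++ [c] else key) else key) []
  pvValid.foldl (fun key c => if c ∉ key then key ++ [c] else key) key1

-- ===== PORT A =====
-- 'for i in range(len(plaintext)): char = plaintext[i]' is folded over enumerate (exact: i in range).
-- valid_letters.index(char) and key[indexKey] are ported via index?/pyGet? with a default that is
-- never used: char ∈ pvValid at those points and the key always contains all 26 letters.
-- string[:index] / string[index:] are PySem slices (index is the recorded Int position, ≥ 0).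
def encrypt_Monoalphabetic (plaintext : String) (inputkey : String) : String :=
  let part := (PySem.List.enumerate plaintext.toList 0).foldl
    (fun (acc : List Char × List (Int × Char)) p =>
      if p.2 ∈ pvValid then (acc.1 ++ [p.2], acc.2) else (acc.1, acc.2 ++ [p]))
    ([], [])
  let key := pvBuildKey inputkey
  let index_values := part.1.map (fun c => (PySem.List.index? pvValid c).getD 0)
  let string := index_values.map (fun j => (PySem.List.pyGet? key ((j : Nat) : Int)).getD ' ')
  let final := part.2.foldl
    (fun s p => PySem.List.slice s none (some p.1) ++ [p.2] ++ PySem.List.slice s (some p.1) none)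
    string
  String.mk final

-- ===== PORT B =====
def encrypt_Monoalphabetic_alt (plaintext : String) (inputkey : String) : String :=
  let key := pvBuildKey inputkey
  String.mk (plaintext.toList.map (fun c =>
    if c ∈ pvValid then
      (PySem.List.pyGet? key (((PySem.List.index? pvValid c).getD 0 : Nat) : Int)).getD ' '
    else c))

-- ===== PRECONDITION & SPEC =====
def Spec_encrypt_Monoalphabetic (plaintext : String) (inputkey : String) (out : String) : Prop := out = encrypt_Monoalphabetic_alt plaintext inputkey
instance (plaintext : String) (inputkey : String) (out : String) : Decidable (Spec_encrypt_Monoalphabetic plaintext inputkey out) := by unfold Spec_encrypt_Monoalphabetic; infer_instance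

-- ===== CLAIM (what is proved, stated in full; the proofs are below) =====
def Claim_equal_encrypt_Monoalphabetic : Prop := ∀ (plaintext : String) (inputkey : String), Dom_encrypt_Monoalphabetic plaintext inputkey → Spec_encrypt_Monoalphabetic plaintext inputkey (encrypt_Monoalphabetic plaintext inputkey)

-- ===== LEMMAS AND PROOFS =====

-- the non-alpha characters of l with their absolute positions, positions starting at n
def pvNA : List Char → Int → List (Int × Char)
  | [], _ => []
  | c :: t, n => if c ∈ pvValid then pvNA t (n + 1) else (n, c) :: pvNA t (n + 1)

-- A's substitution of one (alphabetic) character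
def pvSubA (key : List Char) (c : Char) : Char :=
  (PySem.List.pyGet? key (((PySem.List.index? pvValid c).getD 0 : Nat) : Int)).getD ' '

-- A's reinsertion loop
def pvIns (s : List Char) (ps : List (Int × Char)) : List Char :=
  ps.foldl (fun s p => PySem.List.slice s none (some p.1) ++ [p.2] ++ PySem.List.slice s (some p.1) none) s

theorem pvNA_shift (l : List Char) (n : Int) :
    pvNA l (n + 1) = (pvNA l n).map (fun p => (p.1 + 1, p.2)) := by
  induction l generalizing n with
  | nil => simp [pvNA]
  | cons c t ih =>
    simp only [pvNA]
    split <;> simp [ih]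

theorem pvNA_nonneg (l : List Char) (n : Int) (hn : 0 ≤ n) :
    ∀ p ∈ pvNA l n, 0 ≤ p.1 := by
  induction l generalizing n with
  | nil => simp [pvNA]
  | cons c t ih =>
    intro p hp
    simp only [pvNA] at hp
    split at hp
    · exact ih (n + 1) (by omega) p hp
    · rcases List.mem_cons.mp hp with h0 | h0
      · subst h0; simpa using hn
      · exact ih (n + 1) (by omega) p h0

theorem pvIns_cons_zero (s : List Char) (c : Char) (ps : List (Int × Char)) :
    pvIns s ((0, c) :: ps) = pvIns (c :: s) ps := by
  simp only [pvIns, List.foldl_cons]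
  rw [PySem.List.slice_to s (by omega : (0:Int) ≤ 0), PySem.List.slice_from s (le_refl (0:Int))]
  simp

theorem pvIns_shift (ps : List (Int × Char)) (s : List Char) (x : Char)
    (h : ∀ p ∈ ps, 0 ≤ p.1) :
    pvIns (x :: s) (ps.map (fun p => (p.1 + 1, p.2))) = x :: pvIns s ps := by
  induction ps generalizing s with
  | nil => simp [pvIns]
  | cons p t ih =>
    have hp : 0 ≤ p.1 := h p (by simp)
    have htn : (p.1 + 1).toNat = p.1.toNat + 1 := by omega
    have h1 : PySem.List.slice (x :: s) none (some (p.1 + 1)) =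
        x :: PySem.List.slice s none (some p.1) := by
      rw [PySem.List.slice_to (x :: s) (by omega), PySem.List.slice_to s hp, htn]
      simp
    have h2 : PySem.List.slice (x :: s) (some (p.1 + 1)) none =
        PySem.List.slice s (some p.1) none := by
      rw [PySem.List.slice_from (x :: s) (by omega), PySem.List.slice_from s hp, htn]
      simp
    simp only [List.map_cons, pvIns, List.foldl_cons, h1, h2, List.cons_append]
    exact ih (PySem.List.slice s none (some p.1) ++ [p.2] ++ PySem.List.slice s (some p.1) none)
      (fun q hq => h q (List.mem_cons_of_mem _ hq))

-- the partition loop of A computes (filtered alphas, pvNA)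
theorem pvPart_fold (l : List Char) (n : Int) (a : List Char) (b : List (Int × Char)) :
    (PySem.List.enumerate l n).foldl
      (fun (acc : List Char × List (Int × Char)) p =>
        if p.2 ∈ pvValid then (acc.1 ++ [p.2], acc.2) else (acc.1, acc.2 ++ [p]))
      (a, b)
    = (a ++ l.filter (· ∈ pvValid), b ++ pvNA l n) := by
  induction l generalizing n a b with
  | nil => simp [PySem.List.enumerate_nil, pvNA]
  | cons c t ih =>
    rw [PySem.List.enumerate_cons]
    simp only [List.foldl_cons, pvNA, List.filter_cons]
    by_cases hc : c ∈ pvValid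
    · simp only [hc, if_true, decide_true]
      rw [ih]
      simp
    · simp only [hc, if_false, decide_false]
      rw [ih]
      simp

-- reassembling A's substituted alphas with pvNA gives B's single pass
theorem pvMain (key : List Char) (l : List Char) :
    pvIns ((l.filter (· ∈ pvValid)).map (pvSubA key)) (pvNA l 0)
    = l.map (fun c => if c ∈ pvValid then pvSubA key c else c) := by
  induction l with
  | nil => simp [pvIns, pvNA]
  | cons c t ih =>
    simp only [pvNA, List.filter_cons, List.map_cons]
    by_cases hc : c ∈ pvValid
    · simp only [hc, if_true, decide_true, List.map_cons]
      rw [pvNA_shift t 0, pvIns_shift _ _ _ (pvNA_nonneg t 0 le_rfl), ih]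
    · simp only [hc, if_false, decide_false, Bool.false_eq_true]
      rw [pvNA_shift t 0, pvIns_cons_zero, pvIns_shift _ _ _ (pvNA_nonneg t 0 le_rfl), ih]

-- ===== VERDICT (by name: the statement is the Claim_ definition above) =====
theorem encrypt_Monoalphabetic_spec : Claim_equal_encrypt_Monoalphabetic := by
  intro plaintext inputkey _
  unfold Spec_encrypt_Monoalphabetic
  simp only [encrypt_Monoalphabetic, encrypt_Monoalphabetic_alt]
  rw [pvPart_fold plaintext.toList 0 [] []]
  simp only [List.nil_append, List.map_map, Function.comp_def]
  have h := pvMain (pvBuildKey inputkey) plaintext.toList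
  rw [show pvSubA (pvBuildKey inputkey) = (fun x =>
        (PySem.List.pyGet? (pvBuildKey inputkey)
          (((PySem.List.index? pvValid x).getD 0 : Nat) : Int)).getD ' ') from rfl,
      pvIns] at h
  rw [h]
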